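-- pv_equiv track=rewrite | github.com/OneForward/LeetCode | OJ/leet1178/leet1178.py | findNumOfValidWords
-- ===== SOURCE A (Python) =====
-- from typing import List
-- from collections import defaultdict
--
-- def findNumOfValidWords(words: List[str], puzzles: List[str]) -> List[int]:
--     D = defaultdict(int)
--     for word in words:
--         x = 0
--         for ch in word:
--             x |= (1 << (ord(ch) - ord('a')))
--         D[x] += 1
--
--     ans = []
--     for p in puzzles:
--         x = 0
--         for ch in p:
--             x |= (1 << (ord(ch) - ord('a')))
--         first = (1 << (ord(p[0]) - ord('a')))
--         mask = x
--         cnt = 0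
--         while x:
--             if x in D and x & first: cnt += D[x]
--             x = (x - 1) & mask
--         ans.append(cnt)
--     return ans
-- ===== SOURCE B (Python) =====
-- from typing import List
--
-- def _count(wsets, p):
--     first = p[0]
--     ps = set(p)
--     return sum(1 for s in wsets if first in s and s <= ps)
--
-- def findNumOfValidWords(words: List[str], puzzles: List[str]) -> List[int]:
--     wsets = [set(w) for w in words]
--     return [_count(wsets, p) for p in puzzles]
-- ===== Notes on version B (the rewrite author's own statement) =====
-- stated objective: alternative
-- what changed: Replaces A's bitmask counter dict plus per-puzzle submask enumeration (the (x-1)&mask loop) by precomputed per-word letter sets and a direct scan of all word sets per puzzle testing first-letter membership and set inclusion.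
-- crash fix: On inputs where every puzzle is nonempty but some word or puzzle contains a character below 'a' (uppercase, digits, spaces), A raises ValueError (negative shift count) while B just returns the per-puzzle counts (such characters make letter sets that fail the match tests). — e.g. on findNumOfValidWords(["Ab"], ["ab"]): A raises ValueError, B returns [0]
import Mathlib
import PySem

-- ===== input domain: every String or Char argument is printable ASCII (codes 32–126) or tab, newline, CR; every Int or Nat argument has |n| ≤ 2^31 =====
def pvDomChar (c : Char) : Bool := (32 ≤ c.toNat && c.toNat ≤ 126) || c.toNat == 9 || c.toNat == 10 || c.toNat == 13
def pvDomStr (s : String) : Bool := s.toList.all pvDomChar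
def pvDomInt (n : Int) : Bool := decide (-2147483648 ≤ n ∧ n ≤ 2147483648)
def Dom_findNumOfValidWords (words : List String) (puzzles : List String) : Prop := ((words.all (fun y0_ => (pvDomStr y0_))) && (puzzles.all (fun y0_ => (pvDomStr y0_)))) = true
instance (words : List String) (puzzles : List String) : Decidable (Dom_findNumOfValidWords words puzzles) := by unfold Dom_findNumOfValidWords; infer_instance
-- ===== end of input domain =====

-- B replaces A's bitmask-counter dict + per-puzzle submask enumeration by per-word letter
-- sets and a direct scan of all words per puzzle (alternative decomposition, not claimed faster).

-- ===== PORT A =====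
-- 1 << (ord(ch) - ord('a')); Nat subtraction clamps where Python would raise
-- ValueError on a negative shift — exact on Pre_, where every code is ≥ 97.
def pvCharBit (ch : Char) : Nat := 1 <<< (ch.toNat - 97)

-- x = 0; for ch in s: x |= 1 << (ord(ch) - ord('a'))
def pvMask (s : String) : Nat := s.toList.foldl (fun x ch => x ||| pvCharBit ch) 0

-- D = defaultdict(int); for word in words: D[mask(word)] += 1
def pvBuildD (words : List String) : PySem.Dict Nat Int :=
  words.foldl (fun d w => d.modify (pvMask w) 0 (· + 1)) PySem.Dict.empty

-- while x: if x in D and x & first: cnt += D[x]; x = (x - 1) & mask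
def pvSubLoop (D : PySem.Dict Nat Int) (first mask : Nat) (x : Nat) (cnt : Int) : Int :=
  if x = 0 then cnt
  else pvSubLoop D first mask ((x - 1) &&& mask)
        (if D.contains x ∧ x &&& first ≠ 0 then cnt + D.getD x 0 else cnt)
termination_by x
decreasing_by exact Nat.lt_of_le_of_lt Nat.and_le_left (by omega)

def findNumOfValidWords (words : List String) (puzzles : List String) : List Int :=
  let D := pvBuildD words
  puzzles.foldl (fun ans p =>
    let x := pvMask p
    -- p[0]: IndexError on an empty puzzle, excluded by Pre_ (getD default unreachable there)
    let first := pvCharBit ((PySem.Str.pyGet? p 0).getD 'a')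
    ans ++ [pvSubLoop D first x x 0]) []

-- ===== PORT B =====
-- _count(wsets, p); p[0] raises IndexError on an empty puzzle, excluded by Pre_
def pvCountB (wsets : List (PySem.Set Char)) (p : String) : Int :=
  let first := (PySem.Str.pyGet? p 0).getD 'a'
  let ps := PySem.Set.ofList p.toList
  ((wsets.countP (fun s => PySem.Set.contains s first && PySem.Set.issubset s ps) : Nat) : Int)

def findNumOfValidWords_alt (words : List String) (puzzles : List String) : List Int :=
  let wsets := words.map (fun w => PySem.Set.ofList w.toList)
  puzzles.map (fun p => pvCountB wsets p)

-- ===== PRECONDITION & SPEC =====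
-- Pre_ excludes exactly the inputs where A raises: an empty puzzle (IndexError from p[0])
-- and any character below 'a' in a word or puzzle (ValueError: negative shift count).
def Pre_findNumOfValidWords (words : List String) (puzzles : List String) : Prop :=
  (puzzles.all (fun p => p != "") &&
   words.all (fun w => w.toList.all (fun c => 97 ≤ c.toNat)) &&
   puzzles.all (fun p => p.toList.all (fun c => 97 ≤ c.toNat))) = true
instance (words : List String) (puzzles : List String) : Decidable (Pre_findNumOfValidWords words puzzles) := by unfold Pre_findNumOfValidWords; infer_instance
def pvWitness_findNumOfValidWords : List String × List String := (["apple", "pleas", "z"], ["aelwp", "pz"])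

-- A raises (ValueError: negative shift count) whenever some word or puzzle contains a
-- character below 'a' while every puzzle is nonempty; B just returns the counts there
-- (such characters make letter sets that simply fail the match tests).
def Raises_findNumOfValidWords (words : List String) (puzzles : List String) : Prop :=
  (puzzles.all (fun p => p != "") &&
   (words.any (fun w => w.toList.any (fun c => c.toNat < 97)) ||
    puzzles.any (fun p => p.toList.any (fun c => c.toNat < 97)))) = true
instance (words : List String) (puzzles : List String) : Decidable (Raises_findNumOfValidWords words puzzles) := by unfold Raises_findNumOfValidWords; infer_instance
def pvRaiseWitness_findNumOfValidWords : List String × List String := (["Ab"], ["ab"])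
def pvRaiseWitnessOut_findNumOfValidWords : List Int := [0]

def Spec_findNumOfValidWords (words : List String) (puzzles : List String) (out : List Int) : Prop := out = findNumOfValidWords_alt words puzzles
instance (words : List String) (puzzles : List String) (out : List Int) : Decidable (Spec_findNumOfValidWords words puzzles out) := by unfold Spec_findNumOfValidWords; infer_instance

-- ===== CLAIM (what is proved, stated in full; the proofs are below) =====
def Claim_equal_findNumOfValidWords : Prop := ∀ (words : List String) (puzzles : List String), Dom_findNumOfValidWords words puzzles → Pre_findNumOfValidWords words puzzles → Spec_findNumOfValidWords words puzzles (findNumOfValidWords words puzzles)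
def Claim_raises_findNumOfValidWords : Prop := (∀ (words : List String) (puzzles : List String), Dom_findNumOfValidWords words puzzles → Raises_findNumOfValidWords words puzzles → ¬ Pre_findNumOfValidWords words puzzles) ∧ (Dom_findNumOfValidWords (pvRaiseWitness_findNumOfValidWords.1) (pvRaiseWitness_findNumOfValidWords.2) ∧ Raises_findNumOfValidWords (pvRaiseWitness_findNumOfValidWords.1) (pvRaiseWitness_findNumOfValidWords.2) ∧ findNumOfValidWords_alt (pvRaiseWitness_findNumOfValidWords.1) (pvRaiseWitness_findNumOfValidWords.2) = pvRaiseWitnessOut_findNumOfValidWords)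

-- ===== LEMMAS AND PROOFS =====

-- deposit the low bits of n into the set bit positions of mask (pdep)
def pvDep (mask n : Nat) : Nat :=
  if mask = 0 then 0
  else if mask % 2 = 1 then 2 * pvDep (mask / 2) (n / 2) + n % 2
  else 2 * pvDep (mask / 2) n
termination_by mask
decreasing_by all_goals omega

-- extract the bits of y at the set bit positions of mask (pext)
def pvExt (mask y : Nat) : Nat :=
  if mask = 0 then 0
  else if mask % 2 = 1 then 2 * pvExt (mask / 2) (y / 2) + y % 2
  else pvExt (mask / 2) (y / 2)
termination_by mask
decreasing_by all_goals omega

-- popcount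
def pvCnt (mask : Nat) : Nat :=
  if mask = 0 then 0 else pvCnt (mask / 2) + mask % 2
termination_by mask
decreasing_by omega

lemma pvTestBit_zero_bit (a i : Nat) (hi : i ≤ 1) : (2*a + i).testBit 0 = decide (i = 1) := by
  simp only [Nat.testBit_zero, decide_eq_decide]
  omega

lemma pvTestBit_succ_bit (a i k : Nat) (hi : i ≤ 1) : (2*a + i).testBit (k+1) = a.testBit k := by
  rw [Nat.testBit_add_one]
  congr 1
  omega

lemma pvAnd_two_mul_add (a b i j : Nat) (hi : i ≤ 1) (hj : j ≤ 1) :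
    (2*a + i) &&& (2*b + j) = 2*(a &&& b) + i*j := by
  have hij : i * j ≤ 1 := by simpa using Nat.mul_le_mul hi hj
  apply Nat.eq_of_testBit_eq
  intro k
  cases k with
  | zero =>
    rw [Nat.testBit_and, pvTestBit_zero_bit a i hi, pvTestBit_zero_bit b j hj,
        pvTestBit_zero_bit _ _ hij]
    interval_cases i <;> interval_cases j <;> simp
  | succ k =>
    rw [Nat.testBit_and, pvTestBit_succ_bit a i k hi, pvTestBit_succ_bit b j k hj,
        pvTestBit_succ_bit _ _ k hij, Nat.testBit_and]

lemma pvDep_odd (mask n : Nat) (hm0 : mask ≠ 0) (h1 : mask % 2 = 1) :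
    pvDep mask n = 2 * pvDep (mask/2) (n/2) + n % 2 := by
  rw [pvDep, if_neg hm0, if_pos h1]

lemma pvDep_even (mask n : Nat) (hm0 : mask ≠ 0) (h1 : mask % 2 ≠ 1) :
    pvDep mask n = 2 * pvDep (mask/2) n := by
  rw [pvDep, if_neg hm0, if_neg h1]

lemma pvExt_odd (mask y : Nat) (hm0 : mask ≠ 0) (h1 : mask % 2 = 1) :
    pvExt mask y = 2 * pvExt (mask/2) (y/2) + y % 2 := by
  rw [pvExt, if_neg hm0, if_pos h1]

lemma pvExt_even (mask y : Nat) (hm0 : mask ≠ 0) (h1 : mask % 2 ≠ 1) :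
    pvExt mask y = pvExt (mask/2) (y/2) := by
  rw [pvExt, if_neg hm0, if_neg h1]

lemma pvCnt_odd (mask : Nat) (h : mask % 2 = 1) : pvCnt mask = pvCnt (mask/2) + 1 := by
  rw [pvCnt, if_neg (by omega), h]

lemma pvCnt_even (mask : Nat) (h0 : mask ≠ 0) (h : mask % 2 = 0) : pvCnt mask = pvCnt (mask/2) := by
  rw [pvCnt, if_neg h0, h]
  omega

lemma pvDep_zero (mask : Nat) : pvDep mask 0 = 0 := by
  induction mask using Nat.strong_induction_on with
  | _ mask ih =>
    by_cases h0 : mask = 0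
    · rw [h0, pvDep]; simp
    · rcases Nat.mod_two_eq_zero_or_one mask with h1 | h1
      · rw [pvDep_even mask 0 h0 (by omega), ih (mask/2) (by omega)]
      · rw [pvDep_odd mask 0 h0 h1, ih (mask/2) (by omega)]

lemma pvDep_and_self (mask : Nat) : ∀ n, pvDep mask n &&& mask = pvDep mask n := by
  induction mask using Nat.strong_induction_on with
  | _ mask ih =>
    intro n
    by_cases h0 : mask = 0
    · rw [h0, Nat.and_zero, pvDep]
      simp
    by_cases h1 : mask % 2 = 1
    · rw [pvDep_odd mask n h0 h1]
      have hm : 2 * (mask/2) + 1 = mask := by omega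
      have h := pvAnd_two_mul_add (pvDep (mask/2) (n/2)) (mask/2) (n % 2) 1 (by omega) (by omega)
      rw [ih (mask/2) (by omega), hm] at h
      simpa using h
    · rw [pvDep_even mask n h0 h1]
      have hm : 2 * (mask/2) = mask := by omega
      have h := pvAnd_two_mul_add (pvDep (mask/2) n) (mask/2) 0 0 (by omega) (by omega)
      rw [ih (mask/2) (by omega)] at h
      simp only [Nat.add_zero, Nat.mul_zero] at h
      rw [hm] at h
      exact h

lemma pvDep_pos (mask : Nat) : ∀ n, 0 < n → n < 2 ^ pvCnt mask → 0 < pvDep mask n := by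
  induction mask using Nat.strong_induction_on with
  | _ mask ih =>
    intro n h0 h
    by_cases hm0 : mask = 0
    · rw [hm0] at h; rw [pvCnt] at h; simp at h; omega
    by_cases h1 : mask % 2 = 1
    · rw [pvDep_odd mask n hm0 h1]
      rcases Nat.eq_zero_or_pos (n % 2) with he | he
      · have : 0 < pvDep (mask/2) (n/2) := by
          apply ih (mask/2) (by omega) (n/2) (by omega)
          rw [pvCnt_odd mask h1, pow_succ] at h; omega
        omega
      · omega
    · rw [pvDep_even mask n hm0 h1]
      have : 0 < pvDep (mask/2) n := by
        apply ih (mask/2) (by omega) n h0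
        rw [pvCnt_even mask hm0 (by omega)] at h; exact h
      omega

lemma pvDep_pred (mask : Nat) : ∀ n, 0 < n → n < 2 ^ pvCnt mask →
    pvDep mask (n - 1) = (pvDep mask n - 1) &&& mask := by
  induction mask using Nat.strong_induction_on with
  | _ mask ih =>
    intro n h0 h
    by_cases hm0 : mask = 0
    · rw [hm0] at h; rw [pvCnt] at h; simp at h; omega
    by_cases h1 : mask % 2 = 1
    · rw [pvCnt_odd mask h1, pow_succ] at h
      have hm : 2 * (mask/2) + 1 = mask := by omega
      rcases Nat.eq_zero_or_pos (n % 2) with he | he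
      · -- n even, n ≥ 2
        have hn2 : 0 < n / 2 := by omega
        have hb2 : n / 2 < 2 ^ pvCnt (mask/2) := by omega
        have hd : 0 < pvDep (mask/2) (n/2) := pvDep_pos (mask/2) (n/2) hn2 hb2
        rw [pvDep_odd mask (n-1) hm0 h1, pvDep_odd mask n hm0 h1]
        have e1 : (n-1) / 2 = n/2 - 1 := by omega
        have e2 : (n-1) % 2 = 1 := by omega
        rw [e1, e2, ih (mask/2) (by omega) (n/2) hn2 hb2]
        have h := pvAnd_two_mul_add (pvDep (mask/2) (n/2) - 1) (mask/2) 1 1 (by omega) (by omega)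
        rw [hm] at h
        have e3 : 2 * pvDep (mask/2) (n/2) + n % 2 - 1 = 2 * (pvDep (mask/2) (n/2) - 1) + 1 := by
          omega
        rw [e3]
        simpa using h.symm
      · -- n odd
        rw [pvDep_odd mask (n-1) hm0 h1, pvDep_odd mask n hm0 h1]
        have e1 : (n-1) / 2 = n/2 := by omega
        have e2 : (n-1) % 2 = 0 := by omega
        have e3 : 2 * pvDep (mask/2) (n/2) + n % 2 - 1 = 2 * pvDep (mask/2) (n/2) + 0 := by omega
        rw [e1, e2, e3]
        have h := pvAnd_two_mul_add (pvDep (mask/2) (n/2)) (mask/2) 0 1 (by omega) (by omega)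
        rw [pvDep_and_self (mask/2) (n/2), hm] at h
        simpa using h.symm
    · -- mask even
      have h2 : mask % 2 = 0 := by omega
      rw [pvCnt_even mask hm0 h2] at h
      have hm : 2 * (mask/2) + 0 = mask := by omega
      have hd : 0 < pvDep (mask/2) n := pvDep_pos (mask/2) n h0 h
      rw [pvDep_even mask (n-1) hm0 h1, pvDep_even mask n hm0 h1]
      rw [ih (mask/2) (by omega) n h0 h]
      have h := pvAnd_two_mul_add (pvDep (mask/2) n - 1) (mask/2) 1 0 (by omega) (by omega)
      rw [hm] at h
      have e3 : 2 * pvDep (mask/2) n - 1 = 2 * (pvDep (mask/2) n - 1) + 1 := by omega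
      rw [e3]
      simpa using h.symm

lemma pvExt_dep (mask : Nat) : ∀ n, n < 2 ^ pvCnt mask → pvExt mask (pvDep mask n) = n := by
  induction mask using Nat.strong_induction_on with
  | _ mask ih =>
    intro n h
    by_cases hm0 : mask = 0
    · rw [hm0] at h ⊢
      rw [pvCnt] at h; simp at h
      rw [h, pvDep_zero, pvExt]; simp
    by_cases h1 : mask % 2 = 1
    · rw [pvCnt_odd mask h1, pow_succ] at h
      rw [pvDep_odd mask n hm0 h1, pvExt_odd mask _ hm0 h1]
      have e1 : (2 * pvDep (mask/2) (n/2) + n % 2) / 2 = pvDep (mask/2) (n/2) := by omega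
      have e2 : (2 * pvDep (mask/2) (n/2) + n % 2) % 2 = n % 2 := by omega
      rw [e1, e2, ih (mask/2) (by omega) (n/2) (by omega)]
      omega
    · have h2 : mask % 2 = 0 := by omega
      rw [pvCnt_even mask hm0 h2] at h
      rw [pvDep_even mask n hm0 h1, pvExt_even mask _ hm0 h1]
      have e1 : 2 * pvDep (mask/2) n / 2 = pvDep (mask/2) n := by omega
      rw [e1, ih (mask/2) (by omega) n h]

lemma pvDep_ext (mask : Nat) : ∀ y, y &&& mask = y → pvDep mask (pvExt mask y) = y := by
  induction mask using Nat.strong_induction_on with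
  | _ mask ih =>
    intro y hy
    by_cases hm0 : mask = 0
    · rw [hm0, Nat.and_zero] at hy
      rw [hm0, ← hy, pvDep]; simp
    have hsplit : (2 * (y/2) + y % 2) &&& (2 * (mask/2) + mask % 2) =
        2 * ((y/2) &&& (mask/2)) + (y % 2) * (mask % 2) :=
      pvAnd_two_mul_add _ _ _ _ (by omega) (by omega)
    rw [Nat.div_add_mod, Nat.div_add_mod] at hsplit
    rw [hy] at hsplit
    by_cases h1 : mask % 2 = 1
    · rw [h1, Nat.mul_one] at hsplit
      have hsub : (y/2) &&& (mask/2) = y/2 := by omega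
      rw [pvExt_odd mask y hm0 h1, pvDep_odd mask _ hm0 h1]
      have e1 : (2 * pvExt (mask/2) (y/2) + y % 2) / 2 = pvExt (mask/2) (y/2) := by omega
      have e2 : (2 * pvExt (mask/2) (y/2) + y % 2) % 2 = y % 2 := by omega
      rw [e1, e2, ih (mask/2) (by omega) (y/2) hsub]
      omega
    · have h2 : mask % 2 = 0 := by omega
      rw [h2, Nat.mul_zero] at hsplit
      have hy2 : y % 2 = 0 := by omega
      have hsub : (y/2) &&& (mask/2) = y/2 := by omega
      rw [pvExt_even mask y hm0 h1, pvDep_even mask _ hm0 h1]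
      rw [ih (mask/2) (by omega) (y/2) hsub]
      omega

lemma pvExt_lt (mask : Nat) : ∀ y, pvExt mask y < 2 ^ pvCnt mask := by
  induction mask using Nat.strong_induction_on with
  | _ mask ih =>
    intro y
    by_cases hm0 : mask = 0
    · rw [hm0, pvExt, pvCnt]; simp
    by_cases h1 : mask % 2 = 1
    · rw [pvExt_odd mask y hm0 h1, pvCnt_odd mask h1, pow_succ]
      have := ih (mask/2) (by omega) (y/2)
      omega
    · rw [pvExt_even mask y hm0 h1, pvCnt_even mask hm0 (by omega)]
      exact ih (mask/2) (by omega) (y/2)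

lemma pvExt_self (mask : Nat) : pvExt mask mask = 2 ^ pvCnt mask - 1 := by
  induction mask using Nat.strong_induction_on with
  | _ mask ih =>
    by_cases hm0 : mask = 0
    · rw [hm0, pvExt, pvCnt]; simp
    by_cases h1 : mask % 2 = 1
    · rw [pvExt_odd mask mask hm0 h1, pvCnt_odd mask h1, pow_succ,
          ih (mask/2) (by omega), h1]
      have : 0 < 2 ^ pvCnt (mask/2) := Nat.two_pow_pos _
      omega
    · rw [pvExt_even mask mask hm0 h1, pvCnt_even mask hm0 (by omega)]
      exact ih (mask/2) (by omega)

lemma pvDep_top (mask : Nat) : pvDep mask (2 ^ pvCnt mask - 1) = mask := by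
  rw [← pvExt_self mask]
  exact pvDep_ext mask mask (Nat.and_self mask)

lemma pvSubLoop_zero (D : PySem.Dict Nat Int) (first mask : Nat) (cnt : Int) :
    pvSubLoop D first mask 0 cnt = cnt := by
  rw [pvSubLoop]
  simp

lemma pvSubLoop_ne (D : PySem.Dict Nat Int) (first mask x : Nat) (cnt : Int) (h : x ≠ 0) :
    pvSubLoop D first mask x cnt =
      pvSubLoop D first mask ((x - 1) &&& mask)
        (if D.contains x ∧ x &&& first ≠ 0 then cnt + D.getD x 0 else cnt) := by
  rw [pvSubLoop, if_neg h]

-- contribution of one visited submask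
def pvG (D : PySem.Dict Nat Int) (first x : Nat) : Int :=
  if D.contains x ∧ x &&& first ≠ 0 then D.getD x 0 else 0

lemma pvStep (D : PySem.Dict Nat Int) (first x : Nat) (cnt : Int) :
    (if D.contains x ∧ x &&& first ≠ 0 then cnt + D.getD x 0 else cnt) = cnt + pvG D first x := by
  unfold pvG
  split_ifs <;> ring

lemma pvSubLoop_dep (D : PySem.Dict Nat Int) (first mask : Nat) :
    ∀ n, n < 2 ^ pvCnt mask → ∀ (c : Int),
      pvSubLoop D first mask (pvDep mask n) c =
        c + ∑ j ∈ Finset.range n, pvG D first (pvDep mask (j+1)) := by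
  intro n
  induction n with
  | zero => intro h c; rw [pvDep_zero, pvSubLoop_zero]; simp
  | succ n ih =>
    intro h c
    have hpos : 0 < pvDep mask (n+1) := pvDep_pos mask (n+1) (by omega) h
    rw [pvSubLoop_ne D first mask _ c (by omega), pvStep]
    have hpred : (pvDep mask (n+1) - 1) &&& mask = pvDep mask n := by
      have h' := pvDep_pred mask (n+1) (by omega) h
      simpa using h'.symm
    rw [hpred, ih (by omega), Finset.sum_range_succ]
    ring

lemma pvSubLoop_sum (D : PySem.Dict Nat Int) (first mask : Nat) :
    pvSubLoop D first mask mask 0 =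
      ∑ j ∈ Finset.range (2 ^ pvCnt mask - 1), pvG D first (pvDep mask (j+1)) := by
  have hlt : 2 ^ pvCnt mask - 1 < 2 ^ pvCnt mask := by
    have := Nat.two_pow_pos (pvCnt mask); omega
  have h := pvSubLoop_dep D first mask (2 ^ pvCnt mask - 1) hlt 0
  rw [pvDep_top] at h
  simpa using h

lemma pvBuildD_eq (words : List String) :
    pvBuildD words = PySem.Dict.counter (words.map pvMask) := by
  rw [PySem.Dict.counter_eq_foldl, List.foldl_map]
  rfl

lemma pvG_counter (l : List Nat) (first x : Nat) :
    pvG (PySem.Dict.counter l) first x =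
      if x &&& first ≠ 0 then (l.count x : Int) else 0 := by
  unfold pvG
  rw [PySem.Dict.getD_counter, PySem.Dict.contains_counter]
  by_cases hm : x ∈ l
  · simp [hm]
  · have hc : l.count x = 0 := List.count_eq_zero.mpr hm
    simp [hm, hc]

lemma pvSum_indicator (mask first m : Nat) :
    (∑ j ∈ Finset.range (2 ^ pvCnt mask - 1),
        (if pvDep mask (j+1) &&& first ≠ 0 ∧ pvDep mask (j+1) = m then (1:Int) else 0)) =
      if m &&& mask = m ∧ m ≠ 0 ∧ m &&& first ≠ 0 then 1 else 0 := by
  have hterm : ∀ j, (if pvDep mask (j+1) &&& first ≠ 0 ∧ pvDep mask (j+1) = m then (1:Int) else 0)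
      = if pvDep mask (j+1) = m then (if m &&& first ≠ 0 then (1:Int) else 0) else 0 := by
    intro j
    by_cases he : pvDep mask (j+1) = m
    · subst he; simp
    · simp [he]
  rw [Finset.sum_congr rfl (fun j _ => hterm j)]
  by_cases hm : m &&& mask = m ∧ m ≠ 0
  · obtain ⟨hsub, hne⟩ := hm
    have hext_lt := pvExt_lt mask m
    have hdep_ext := pvDep_ext mask m hsub
    have hext_ne : pvExt mask m ≠ 0 := fun h0 => hne (by rw [← hdep_ext, h0, pvDep_zero])
    have hmem : pvExt mask m - 1 ∈ Finset.range (2 ^ pvCnt mask - 1) := by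
      rw [Finset.mem_range]; omega
    have hside : ∀ b ∈ Finset.range (2 ^ pvCnt mask - 1), b ≠ pvExt mask m - 1 →
        (if pvDep mask (b+1) = m then (if m &&& first ≠ 0 then (1:Int) else 0) else 0) = 0 := by
      intro j hj hne_j
      rw [if_neg]
      intro hdm
      apply hne_j
      have hjlt : j + 1 < 2 ^ pvCnt mask := by rw [Finset.mem_range] at hj; omega
      have hx := pvExt_dep mask (j+1) hjlt
      rw [hdm] at hx
      omega
    rw [Finset.sum_eq_single_of_mem _ hmem hside]
    have he1 : pvExt mask m - 1 + 1 = pvExt mask m := by omega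
    rw [he1, hdep_ext, if_pos rfl]
    by_cases hf : m &&& first ≠ 0
    · rw [if_pos hf, if_pos ⟨hsub, hne, hf⟩]
    · have hcond : ¬(m &&& mask = m ∧ m ≠ 0 ∧ m &&& first ≠ 0) := by tauto
      rw [if_neg hf, if_neg hcond]
  · have hcond : ¬(m &&& mask = m ∧ m ≠ 0 ∧ m &&& first ≠ 0) := by tauto
    rw [if_neg hcond]
    apply Finset.sum_eq_zero
    intro j hj
    rw [Finset.mem_range] at hj
    rw [if_neg]
    intro hdm
    apply hm
    have hpos := pvDep_pos mask (j+1) (by omega) (by omega)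
    exact ⟨by rw [← hdm]; exact pvDep_and_self mask (j+1), by rw [← hdm]; omega⟩

lemma pvSum_count (mask first : Nat) (l : List Nat) :
    (∑ j ∈ Finset.range (2 ^ pvCnt mask - 1),
        (if pvDep mask (j+1) &&& first ≠ 0 then (l.count (pvDep mask (j+1)) : Int) else 0)) =
      (l.countP (fun m => decide (m &&& mask = m ∧ m ≠ 0 ∧ m &&& first ≠ 0)) : Int) := by
  induction l with
  | nil => simp
  | cons m t ih =>
    rw [List.countP_cons]
    have hterm : ∀ j ∈ Finset.range (2 ^ pvCnt mask - 1),
        (if pvDep mask (j+1) &&& first ≠ 0 then ((m :: t).count (pvDep mask (j+1)) : Int) else 0)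
        = (if pvDep mask (j+1) &&& first ≠ 0 then (t.count (pvDep mask (j+1)) : Int) else 0)
          + (if pvDep mask (j+1) &&& first ≠ 0 ∧ pvDep mask (j+1) = m then (1:Int) else 0) := by
      intro j _
      rw [List.count_cons]
      by_cases hf : pvDep mask (j+1) &&& first ≠ 0
      · rw [if_pos hf, if_pos hf]
        by_cases he : pvDep mask (j+1) = m
        · rw [if_pos (by simp only [beq_iff_eq]; exact he.symm), if_pos ⟨hf, he⟩]
          push_cast
          ring
        · have hcond : ¬(pvDep mask (j+1) &&& first ≠ 0 ∧ pvDep mask (j+1) = m) := by tauto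
          rw [if_neg (by simp only [beq_iff_eq]; exact fun hc => he hc.symm), if_neg hcond]
          push_cast
          ring
      · have hcond : ¬(pvDep mask (j+1) &&& first ≠ 0 ∧ pvDep mask (j+1) = m) := by tauto
        rw [if_neg hf, if_neg hf, if_neg hcond]
        ring
    rw [Finset.sum_congr rfl hterm, Finset.sum_add_distrib, ih, pvSum_indicator]
    simp only [decide_eq_true_eq]
    split_ifs <;> push_cast <;> ring

lemma pvMask_foldl_testBit (cs : List Char) (acc : Nat) (j : Nat) :
    (cs.foldl (fun x ch => x ||| pvCharBit ch) acc).testBit j = true ↔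
      acc.testBit j = true ∨ ∃ c ∈ cs, c.toNat - 97 = j := by
  induction cs generalizing acc with
  | nil => simp
  | cons c t ih =>
    simp only [List.foldl_cons]
    rw [ih]
    have hbit : (acc ||| pvCharBit c).testBit j = true ↔
        acc.testBit j = true ∨ c.toNat - 97 = j := by
      unfold pvCharBit
      rw [Nat.testBit_or, Nat.shiftLeft_eq, one_mul, Nat.testBit_two_pow]
      simp
    rw [hbit]
    constructor
    · rintro (⟨h | h⟩ | ⟨d, hd, he⟩)
      · exact Or.inl h
      · exact Or.inr ⟨c, by simp, h⟩
      · exact Or.inr ⟨d, by simp [hd], he⟩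
    · rintro (h | ⟨d, hd, he⟩)
      · exact Or.inl (Or.inl h)
      · rcases List.mem_cons.mp hd with rfl | hdt
        · exact Or.inl (Or.inr he)
        · exact Or.inr ⟨d, hdt, he⟩

lemma pvMask_testBit (s : String) (j : Nat) :
    (pvMask s).testBit j = true ↔ ∃ c ∈ s.toList, c.toNat - 97 = j := by
  unfold pvMask
  rw [pvMask_foldl_testBit]
  simp [Nat.zero_testBit]

lemma pvAnd_pow_ne (x k : Nat) : x &&& 2 ^ k ≠ 0 ↔ x.testBit k = true := by
  constructor
  · intro h
    by_contra hb
    rw [Bool.not_eq_true] at hb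
    apply h
    apply Nat.eq_of_testBit_eq
    intro j
    rw [Nat.testBit_and, Nat.testBit_two_pow, Nat.zero_testBit]
    by_cases hj : k = j
    · subst hj; simp [hb]
    · simp [hj]
  · intro h hz
    have h2 := congrArg (fun n => n.testBit k) hz
    simp only [Nat.testBit_and, Nat.testBit_two_pow, Nat.zero_testBit, h] at h2
    simp at h2

lemma pvSubmask_iff (x y : Nat) :
    x &&& y = x ↔ ∀ j, x.testBit j = true → y.testBit j = true := by
  constructor
  · intro h j hx
    have h2 := congrArg (fun n => n.testBit j) h
    simp only [Nat.testBit_and, hx, Bool.true_and] at h2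
    exact h2
  · intro h
    apply Nat.eq_of_testBit_eq
    intro j
    rw [Nat.testBit_and]
    cases hx : x.testBit j
    · simp
    · simp [h j hx]

lemma pvChar_eq_of_sub (c d : Char) (hc : 97 ≤ c.toNat) (hd : 97 ≤ d.toNat)
    (h : c.toNat - 97 = d.toNat - 97) : c = d := by
  have hn : c.toNat = d.toNat := by omega
  have := Char.ofNat_toNat c
  rw [hn, Char.ofNat_toNat] at this
  exact this.symm

lemma pvPred_iff (w p : String) (p0 : Char)
    (hw : ∀ c ∈ w.toList, 97 ≤ c.toNat) (hp : ∀ c ∈ p.toList, 97 ≤ c.toNat)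
    (hp0 : 97 ≤ p0.toNat) :
    (pvMask w &&& pvMask p = pvMask w ∧ pvMask w ≠ 0 ∧ pvMask w &&& pvCharBit p0 ≠ 0)
      ↔ (p0 ∈ w.toList ∧ ∀ c ∈ w.toList, c ∈ p.toList) := by
  have hfirst : pvMask w &&& pvCharBit p0 ≠ 0 ↔ p0 ∈ w.toList := by
    unfold pvCharBit
    rw [Nat.shiftLeft_eq, one_mul, pvAnd_pow_ne, pvMask_testBit]
    constructor
    · rintro ⟨c, hc, he⟩
      rwa [pvChar_eq_of_sub c p0 (hw c hc) hp0 he] at hc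
    · intro h
      exact ⟨p0, h, rfl⟩
  have hsub : pvMask w &&& pvMask p = pvMask w ↔ ∀ c ∈ w.toList, c ∈ p.toList := by
    rw [pvSubmask_iff]
    constructor
    · intro h c hc
      have := h (c.toNat - 97) ((pvMask_testBit w _).mpr ⟨c, hc, rfl⟩)
      obtain ⟨d, hd, he⟩ := (pvMask_testBit p _).mp this
      rwa [← pvChar_eq_of_sub d c (hp d hd) (hw c hc) he]
    · intro h j hj
      obtain ⟨c, hc, he⟩ := (pvMask_testBit w j).mp hj
      exact (pvMask_testBit p j).mpr ⟨c, h c hc, he⟩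
  constructor
  · rintro ⟨h1, _, h3⟩
    exact ⟨hfirst.mp h3, hsub.mp h1⟩
  · rintro ⟨h1, h2⟩
    refine ⟨hsub.mpr h2, ?_, hfirst.mpr h1⟩
    intro h0
    have := hfirst.mpr h1
    rw [h0] at this
    simp [Nat.zero_and] at this

lemma pvHead_mem (p : String) (hne : p ≠ "") :
    (PySem.Str.pyGet? p 0).getD 'a' ∈ p.toList := by
  have hnil : p.toList ≠ [] := by simpa using hne
  have hlen : 0 < p.toList.length := List.length_pos_iff.mpr hnil
  have h0 : PySem.Str.pyGet? p 0 = some p.toList[0] := by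
    have he : PySem.Str.pyGet? p 0 = PySem.List.pyGet? p.toList ((0:Nat):Int) := rfl
    rw [he, PySem.List.pyGet?_natCast]
    exact List.getElem?_eq_getElem hlen
  rw [h0, Option.getD_some]
  exact List.getElem_mem hlen

lemma pvPerPuzzle (words : List String) (p : String)
    (hwords : ∀ w ∈ words, ∀ c ∈ w.toList, 97 ≤ c.toNat)
    (hpne : p ≠ "") (hp : ∀ c ∈ p.toList, 97 ≤ c.toNat) :
    pvSubLoop (pvBuildD words) (pvCharBit ((PySem.Str.pyGet? p 0).getD 'a'))
        (pvMask p) (pvMask p) 0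
      = (((words.map (fun w => PySem.Set.ofList w.toList)).countP (fun s =>
            PySem.Set.contains s ((PySem.Str.pyGet? p 0).getD 'a') &&
            PySem.Set.issubset s (PySem.Set.ofList p.toList)) : Nat) : Int) := by
  set p0 := (PySem.Str.pyGet? p 0).getD 'a' with hp0def
  have hp0mem : p0 ∈ p.toList := pvHead_mem p hpne
  have hp0 : 97 ≤ p0.toNat := hp p0 hp0mem
  rw [pvSubLoop_sum, pvBuildD_eq]
  rw [Finset.sum_congr rfl (fun j _ => pvG_counter (words.map pvMask) _ _)]
  rw [pvSum_count]
  congr 1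
  rw [List.countP_map, List.countP_map]
  apply List.countP_congr
  intro w hwmem
  have hiff := pvPred_iff w p p0 (hwords w hwmem) hp hp0
  simp only [Function.comp_apply, decide_eq_true_eq, Bool.and_eq_true,
    PySem.Set.contains_iff, PySem.Set.issubset_iff, PySem.Set.mem_ofList]
  exact hiff

-- ===== VERDICT (by name: the statement is the Claim_ definition above) =====
theorem findNumOfValidWords_spec : Claim_equal_findNumOfValidWords := by
  intro words puzzles _ hpre
  unfold Pre_findNumOfValidWords at hpre
  simp only [Bool.and_eq_true, List.all_eq_true, bne_iff_ne, decide_eq_true_eq] at hpre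
  obtain ⟨⟨hne, hw⟩, hp⟩ := hpre
  unfold Spec_findNumOfValidWords findNumOfValidWords findNumOfValidWords_alt
  simp only []
  rw [PySem.List.foldl_append_singleton_eq_map]
  rw [List.nil_append]
  symm
  apply List.map_congr_left
  intro p hpmem
  exact (pvPerPuzzle words p hw (hne p hpmem) (hp p hpmem)).symm

theorem findNumOfValidWords_raises : Claim_raises_findNumOfValidWords := by
  unfold Claim_raises_findNumOfValidWords
  constructor
  · intro words puzzles _ hr hpre
    unfold Raises_findNumOfValidWords at hr
    unfold Pre_findNumOfValidWords at hpre
    simp only [Bool.and_eq_true, Bool.or_eq_true, List.all_eq_true, List.any_eq_true,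
      bne_iff_ne, decide_eq_true_eq] at hr hpre
    obtain ⟨⟨-, hw⟩, hp⟩ := hpre
    obtain ⟨-, hbad⟩ := hr
    rcases hbad with ⟨w, hwmem, c, hcmem, hc⟩ | ⟨p, hpmem, c, hcmem, hc⟩
    · have := hw w hwmem c hcmem; omega
    · have := hp p hpmem c hcmem; omega
  · exact ⟨by decide, by decide, by decide⟩

-- self-check: the crash witness indeed lies inside the stated Raises_ region
theorem pvRaiseWitness_findNumOfValidWords_ok :
    Raises_findNumOfValidWords (pvRaiseWitness_findNumOfValidWords.1)
      (pvRaiseWitness_findNumOfValidWords.2) :=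
  findNumOfValidWords_raises.2.2.1
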